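-- pv_equiv track=rewrite | github.com/Fangyi0917/Algorithm | company/bytedance02.py | numOfcase
-- ===== SOURCE A (Python) =====
-- def numOfcase(n,maxd,case):
--         casesum = 0
--         for i in range(n-2):
--                 casenum = 0
--                 # if case[-1] - case[i] <= maxd:
--                 #         casesum += (n-i)*(n-i-1)*(n-i-2)//6%99997867
--                 # else:
--                 j = i + 1
--                 while j < n and (case[j] - case[i] <= maxd):
--                         casenum += 1
--                         j += 1
--                 if casenum >= 2:
--                         casesum += casenum * (casenum-1) %99997867// 2
--         return casesum
-- ===== SOURCE B (Python) =====
-- def numOfcase(n, maxd, case):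
--     # Monotonic-stack + binary-search: for each i the original scans forward
--     # until the first j with case[j] - case[i] > maxd; that j is always a
--     # strict prefix-maximum of case[i+1:n], so keep those maxima on a stack
--     # (built right-to-left) and binary-search it per i.  O(n log n).
--     if n < 3:
--         return 0
--     stack = [(n - 1, case[n - 1])]  # (index, value); values/indices decrease toward the end
--     total = 0
--     for i in reversed(range(n - 2)):
--         v = case[i + 1]
--         while stack and stack[-1][1] <= v:
--             stack.pop()
--         stack.append((i + 1, v))
--         x = case[i] + maxd
--         lo, hi = 0, len(stack)
--         while lo < hi:  # values along stack are strictly decreasing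
--             mid = (lo + hi) // 2
--             if stack[mid][1] > x:
--                 lo = mid + 1
--             else:
--                 hi = mid
--         brk = stack[lo - 1][0] if lo else n
--         c = brk - (i + 1)
--         if c >= 2:
--             total += c * (c - 1) % 99997867 // 2
--     return total
-- ===== Notes on version B (the rewrite author's own statement) =====
-- stated objective: faster
-- what changed: Replaces the per-i forward rescan with a right-to-left monotonic stack of strict prefix maxima plus a binary search per i (the first element exceeding case[i]+maxd after i is always such a maximum), turning the O(n^2) double scan into an O(n log n) sweep.
-- outside the precondition, e.g. on numOfcase(3, 1, [0, 100]): A returns 0, B raises IndexError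
import Mathlib
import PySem

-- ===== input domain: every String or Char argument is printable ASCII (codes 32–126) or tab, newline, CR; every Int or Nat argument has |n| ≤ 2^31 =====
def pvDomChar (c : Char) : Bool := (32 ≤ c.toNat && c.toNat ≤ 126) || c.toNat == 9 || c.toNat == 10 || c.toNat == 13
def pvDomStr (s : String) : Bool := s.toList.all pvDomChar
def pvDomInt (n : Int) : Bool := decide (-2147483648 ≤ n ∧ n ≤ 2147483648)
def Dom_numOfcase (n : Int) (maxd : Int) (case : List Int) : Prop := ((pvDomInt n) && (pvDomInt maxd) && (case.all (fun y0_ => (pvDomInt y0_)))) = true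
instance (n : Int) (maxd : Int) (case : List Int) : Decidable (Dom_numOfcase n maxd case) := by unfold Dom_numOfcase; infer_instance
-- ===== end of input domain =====

-- B replaces A's per-i forward rescan by a right-to-left monotonic stack of strict
-- prefix maxima with a binary search per i (objective: faster, O(n^2) → O(n log n)).

-- ===== PORT A =====
-- inner 'while j < n and (case[j] - case[i] <= maxd): casenum += 1; j += 1'
def cntA (maxd : Int) (case : List Int) (n ci j : Int) : Int :=
  if _h : j < n ∧ PySem.List.pyGetD case j 0 - ci ≤ maxd then
    1 + cntA maxd case n ci (j + 1)
  else 0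
termination_by (n - j).toNat
decreasing_by omega

def numOfcase (n : Int) (maxd : Int) (case : List Int) : Int :=
  (PySem.List.pyRange 0 (n - 2) 1).foldl
    (fun casesum i =>
      let casenum := cntA maxd case n (PySem.List.pyGetD case i 0) (i + 1)
      if 2 ≤ casenum then
        casesum + PySem.Int.floordiv (PySem.Int.mod (casenum * (casenum - 1)) 99997867) 2
      else casesum) 0

-- ===== PORT B =====
-- 'while stack and stack[-1][1] <= v: stack.pop()'
def popLe (v : Int) (st : List (Int × Int)) : List (Int × Int) :=
  if h : st ≠ [] then
    if (st.getLast h).2 ≤ v then popLe v st.dropLast else st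
  else st
termination_by st.length
decreasing_by
  have : 0 < st.length := List.length_pos_of_ne_nil h
  simp [List.length_dropLast]; omega

-- 'while lo < hi: mid = (lo+hi)//2; if stack[mid][1] > x: lo = mid+1 else: hi = mid'
def bsearch (st : List (Int × Int)) (x lo hi : Int) : Int :=
  if _h : lo < hi then
    let mid := PySem.Int.floordiv (lo + hi) 2
    if (PySem.List.pyGetD st mid (0, 0)).2 > x then bsearch st x (mid + 1) hi
    else bsearch st x lo mid
  else lo
termination_by (hi - lo).toNat
decreasing_by
  · have h1 : lo ≤ PySem.Int.floordiv (lo + hi) 2 :=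
      (PySem.Int.le_floordiv_iff_mul_le (by omega)).mpr (by omega)
    omega
  · have h2 : PySem.Int.floordiv (lo + hi) 2 < hi :=
      (PySem.Int.floordiv_lt_iff_lt_mul (by omega)).mpr (by omega)
    have h1 : lo ≤ PySem.Int.floordiv (lo + hi) 2 :=
      (PySem.Int.le_floordiv_iff_mul_le (by omega)).mpr (by omega)
    omega

-- one iteration of B's 'for i in reversed(range(n - 2))' loop, state = (stack, total)
def stepB (n maxd : Int) (case : List Int) (s : List (Int × Int) × Int) (i : Int) :
    List (Int × Int) × Int :=
  let v := PySem.List.pyGetD case (i + 1) 0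
  let st := popLe v s.1 ++ [(i + 1, v)]
  let x := PySem.List.pyGetD case i 0 + maxd
  let lo := bsearch st x 0 (st.length : Int)
  let brk := if lo ≠ 0 then (PySem.List.pyGetD st (lo - 1) (0, 0)).1 else n
  let c := brk - (i + 1)
  (st, if 2 ≤ c then s.2 + PySem.Int.floordiv (PySem.Int.mod (c * (c - 1)) 99997867) 2 else s.2)

def numOfcase_alt (n : Int) (maxd : Int) (case : List Int) : Int :=
  if n < 3 then 0
  else
    ((PySem.List.pyRange 0 (n - 2) 1).reverse.foldl (stepB n maxd case)
      ([(n - 1, PySem.List.pyGetD case (n - 1) 0)], 0)).2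

-- ===== PRECONDITION & SPEC =====
-- Pre_ excludes n > len(case) with n ≥ 3: there the Python A raises IndexError on almost
-- every input and returns only when each early-stopping scan happens to halt before the
-- missing indices (an accident of its implementation), while B indexes case[n-1] up
-- front and raises.
def Pre_numOfcase (n : Int) (maxd : Int) (case : List Int) : Prop :=
  3 ≤ n → n ≤ (case.length : Int)
instance (n : Int) (maxd : Int) (case : List Int) : Decidable (Pre_numOfcase n maxd case) := by
  unfold Pre_numOfcase; infer_instance

def pvWitness_numOfcase : Int × Int × List Int := (5, 2, [1, 2, 3, 4, 10])

def Spec_numOfcase (n : Int) (maxd : Int) (case : List Int) (out : Int) : Prop := out = numOfcase_alt n maxd case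
instance (n : Int) (maxd : Int) (case : List Int) (out : Int) : Decidable (Spec_numOfcase n maxd case out) := by unfold Spec_numOfcase; infer_instance

-- ===== CLAIM (what is proved, stated in full; the proofs are below) =====
def Claim_equal_numOfcase : Prop := ∀ (n : Int) (maxd : Int) (case : List Int), Dom_numOfcase n maxd case → Pre_numOfcase n maxd case → Spec_numOfcase n maxd case (numOfcase n maxd case)

-- ===== LEMMAS AND PROOFS =====

-- value at index t (both programs read the list only through this)
def pvG (case : List Int) (t : Int) : Int := PySem.List.pyGetD case t 0

-- c is "the number of steps the forward scan from j makes before breaking"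
def pvBrkP (n maxd : Int) (case : List Int) (ci j c : Int) : Prop :=
  0 ≤ c ∧ (∀ t, j ≤ t → t < j + c → t < n ∧ pvG case t - ci ≤ maxd) ∧
    (n ≤ j + c ∨ ¬ (pvG case (j + c) - ci ≤ maxd))

lemma pvBrkP_unique (n maxd : Int) (case : List Int) (ci j c₁ c₂ : Int)
    (h1 : pvBrkP n maxd case ci j c₁) (h2 : pvBrkP n maxd case ci j c₂) : c₁ = c₂ := by
  obtain ⟨a0, a1, a2⟩ := h1
  obtain ⟨b0, b1, b2⟩ := h2
  rcases lt_trichotomy c₁ c₂ with h | h | h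
  · have ht := b1 (j + c₁) (by omega) (by omega)
    rcases a2 with h2 | h2
    · omega
    · exact absurd ht.2 h2
  · exact h
  · have ht := a1 (j + c₂) (by omega) (by omega)
    rcases b2 with h2 | h2
    · omega
    · exact absurd ht.2 h2

lemma cntA_spec (maxd : Int) (case : List Int) (n ci : Int) :
    ∀ (fuel : Nat) (j : Int), (n - j).toNat ≤ fuel →
      pvBrkP n maxd case ci j (cntA maxd case n ci j) := by
  intro fuel
  induction fuel with
  | zero =>
    intro j hj
    rw [cntA, dif_neg (by omega : ¬ (j < n ∧ PySem.List.pyGetD case j 0 - ci ≤ maxd))]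
    exact ⟨le_refl 0, fun t h1 h2 => by omega, Or.inl (by omega)⟩
  | succ fuel ih =>
    intro j hj
    rw [cntA]
    by_cases hc : j < n ∧ PySem.List.pyGetD case j 0 - ci ≤ maxd
    · rw [dif_pos hc]
      obtain ⟨c0, c1, c2⟩ := ih (j + 1) (by omega)
      refine ⟨by omega, ?_, ?_⟩
      · intro t h1 h2
        rcases eq_or_lt_of_le h1 with rfl | h1
        · exact ⟨hc.1, hc.2⟩
        · exact c1 t (by omega) (by omega)
      · have : j + (1 + cntA maxd case n ci (j + 1)) = (j + 1) + cntA maxd case n ci (j + 1) := by omega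
        rw [this]
        exact c2
    · rw [dif_neg hc]
      refine ⟨le_refl 0, fun t h1 h2 => by omega, ?_⟩
      rcases not_and_or.mp hc with h | h
      · exact Or.inl (by omega)
      · exact Or.inr (by simpa using h)

-- the stack invariant: entries are positions of [lb, n) with their values, strictly
-- decreasing in both coordinates along the list, and every position of [lb, n) is
-- dominated by a stack entry at a position ≤ it
def pvInv (n : Int) (case : List Int) (lb : Int) (st : List (Int × Int)) : Prop :=
  (∀ p ∈ st, lb ≤ p.1 ∧ p.1 < n ∧ p.2 = pvG case p.1) ∧
  st.Pairwise (fun p q => q.1 < p.1 ∧ q.2 < p.2) ∧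
  (∀ t, lb ≤ t → t < n → ∃ p ∈ st, p.1 ≤ t ∧ pvG case t ≤ p.2)

lemma popLe_prefix (v : Int) : ∀ (fuel : Nat) (st : List (Int × Int)), st.length ≤ fuel →
    popLe v st <+: st := by
  intro fuel
  induction fuel with
  | zero =>
    intro st hst
    have : st = [] := List.length_eq_zero_iff.mp (by omega)
    subst this
    rw [popLe]; simp
  | succ fuel ih =>
    intro st hst
    rw [popLe]
    by_cases h : st ≠ []
    · rw [dif_pos h]
      by_cases h2 : (st.getLast h).2 ≤ v
      · rw [if_pos h2]
        have h3 : st.dropLast.length ≤ fuel := by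
          have := List.length_pos_of_ne_nil h
          simp [List.length_dropLast]; omega
        exact (ih st.dropLast h3).trans st.dropLast_prefix
      · rw [if_neg h2]
    · rw [dif_neg h]

lemma popLe_popped (v : Int) : ∀ (fuel : Nat) (st : List (Int × Int)), st.length ≤ fuel →
    ∀ p ∈ st, p ∉ popLe v st → p.2 ≤ v := by
  intro fuel
  induction fuel with
  | zero =>
    intro st hst p hp _
    have : st = [] := List.length_eq_zero_iff.mp (by omega)
    subst this; simp at hp
  | succ fuel ih =>
    intro st hst p hp hnp
    rw [popLe] at hnp
    by_cases h : st ≠ []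
    · rw [dif_pos h] at hnp
      by_cases h2 : (st.getLast h).2 ≤ v
      · rw [if_pos h2] at hnp
        have hsplit : st.dropLast ++ [st.getLast h] = st := List.dropLast_append_getLast h
        have h3 : st.dropLast.length ≤ fuel := by
          have := List.length_pos_of_ne_nil h
          simp [List.length_dropLast]; omega
        rcases (List.mem_append.mp (hsplit ▸ hp)) with hp' | hp'
        · exact ih st.dropLast h3 p hp' hnp
        · simp at hp'; subst hp'; exact h2
      · rw [if_neg h2] at hnp; exact absurd hp hnp
    · rw [dif_neg h] at hnp; exact absurd hp hnp

lemma popLe_gt (v : Int) : ∀ (fuel : Nat) (st : List (Int × Int)), st.length ≤ fuel →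
    st.Pairwise (fun p q => q.1 < p.1 ∧ q.2 < p.2) →
    ∀ p ∈ popLe v st, v < p.2 := by
  intro fuel
  induction fuel with
  | zero =>
    intro st hst hs p hp
    have : st = [] := List.length_eq_zero_iff.mp (by omega)
    subst this; rw [popLe] at hp; simp at hp
  | succ fuel ih =>
    intro st hst hs p hp
    rw [popLe] at hp
    by_cases h : st ≠ []
    · rw [dif_pos h] at hp
      by_cases h2 : (st.getLast h).2 ≤ v
      · rw [if_pos h2] at hp
        have h3 : st.dropLast.length ≤ fuel := by
          have := List.length_pos_of_ne_nil h
          simp [List.length_dropLast]; omega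
        exact ih st.dropLast h3 (hs.sublist st.dropLast_sublist) p hp
      · rw [if_neg h2] at hp
        have hsplit : st.dropLast ++ [st.getLast h] = st := List.dropLast_append_getLast h
        rcases (List.mem_append.mp (hsplit ▸ hp)) with hp' | hp'
        · have := (List.pairwise_append.mp (hsplit ▸ hs)).2.2 p hp' (st.getLast h) (by simp)
          omega
        · simp at hp'; subst hp'; omega
    · rw [dif_neg h] at hp
      have : st = [] := not_not.mp h
      subst this; simp at hp

lemma insert_inv (n : Int) (case : List Int) (i : Int) (st : List (Int × Int))
    (hInv : pvInv n case (i + 2) st) (hin : i + 1 < n) :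
    pvInv n case (i + 1)
      (popLe (pvG case (i + 1)) st ++ [(i + 1, pvG case (i + 1))]) := by
  obtain ⟨he, hs, hd⟩ := hInv
  set v := pvG case (i + 1) with hv
  have hpre := popLe_prefix v st.length st le_rfl
  have hsub := hpre.sublist
  refine ⟨?_, ?_, ?_⟩
  · intro p hp
    rcases List.mem_append.mp hp with hp' | hp'
    · obtain ⟨h1, h2, h3⟩ := he p (hsub.subset hp')
      exact ⟨by omega, h2, h3⟩
    · simp at hp'; subst hp'; exact ⟨le_refl _, hin, rfl⟩
  · rw [List.pairwise_append]
    refine ⟨hs.sublist hsub, by simp, ?_⟩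
    intro p hp q hq
    simp at hq; subst hq
    have h1 := he p (hsub.subset hp)
    have h2 := popLe_gt v st.length st le_rfl hs p hp
    exact ⟨by omega, by simpa using h2⟩
  · intro t h1 h2
    rcases eq_or_lt_of_le h1 with rfl | h1'
    · exact ⟨(i + 1, v), by simp, le_rfl, le_of_eq hv.symm⟩
    · obtain ⟨p, hp, hple, hdom⟩ := hd t (by omega) h2
      by_cases hpin : p ∈ popLe v st
      · exact ⟨p, List.mem_append_left _ hpin, hple, hdom⟩
      · have hple2 := popLe_popped v st.length st le_rfl p hp hpin
        exact ⟨(i + 1, v), by simp, by omega, by omega⟩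

-- number of stack entries with value > x
def pvM (st : List (Int × Int)) (x : Int) : Nat :=
  (st.takeWhile (fun p => decide (x < p.2))).length

lemma takeWhile_getElem_true {α : Type} (p : α → Bool) :
    ∀ (l : List α) (k : Nat) (hk : k < (l.takeWhile p).length) (hkl : k < l.length),
      p (l[k]) = true := by
  intro l
  induction l with
  | nil => intro k hk _; simp at hk
  | cons a l ih =>
    intro k hk hkl
    by_cases ha : p a
    · rw [List.takeWhile_cons_of_pos ha] at hk
      cases k with
      | zero => simpa using ha
      | succ k => simpa using ih k (by simpa using hk) (by simpa using hkl)
    · rw [List.takeWhile_cons_of_neg ha] at hk; simp at hk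

lemma takeWhile_boundary {α : Type} (p : α → Bool) :
    ∀ (l : List α) (h : (l.takeWhile p).length < l.length),
      p (l[(l.takeWhile p).length]) = false := by
  intro l
  induction l with
  | nil => intro h; simp at h
  | cons a l ih =>
    intro h
    by_cases ha : p a
    · have h' : (List.takeWhile p l).length < l.length := by
        rw [List.takeWhile_cons_of_pos ha] at h; simpa using h
      simpa [List.takeWhile_cons_of_pos ha] using ih h' 
    · simpa [List.takeWhile_cons_of_neg ha] using ha

lemma pvM_iff (st : List (Int × Int)) (x : Int)
    (hs : st.Pairwise (fun p q => q.1 < p.1 ∧ q.2 < p.2)) (k : Nat) (hk : k < st.length) :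
    x < st[k].2 ↔ k < pvM st x := by
  unfold pvM
  constructor
  · intro hx
    by_contra hk'
    push_neg at hk'
    have hmlen : (st.takeWhile (fun p => decide (x < p.2))).length < st.length :=
      lt_of_le_of_lt hk' hk
    have hb := takeWhile_boundary (fun p => decide (x < p.2)) st hmlen
    simp only [decide_eq_false_iff_not] at hb
    rcases eq_or_lt_of_le hk' with heq | hlt
    · subst heq; exact hb hx
    · have h2 := ((List.pairwise_iff_getElem.mp hs) _ k hmlen hk hlt).2
      exact hb (lt_trans hx h2)
  · intro hk'
    have := takeWhile_getElem_true (fun p => decide (x < p.2)) st k hk' hk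
    simpa using this

lemma bsearch_eq (st : List (Int × Int)) (x : Int)
    (hs : st.Pairwise (fun p q => q.1 < p.1 ∧ q.2 < p.2)) :
    ∀ (fuel : Nat) (lo hi : Int), (hi - lo).toNat ≤ fuel → 0 ≤ lo →
      lo ≤ (pvM st x : Int) → (pvM st x : Int) ≤ hi → hi ≤ (st.length : Int) →
      bsearch st x lo hi = (pvM st x : Int) := by
  intro fuel
  induction fuel with
  | zero =>
    intro lo hi hf h0 hlo hhi hlen
    rw [bsearch, dif_neg (by omega : ¬ lo < hi)]
    omega
  | succ fuel ih =>
    intro lo hi hf h0 hlo hhi hlen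
    rw [bsearch]
    by_cases hlt : lo < hi
    · rw [dif_pos hlt]
      have hmidlo : lo ≤ PySem.Int.floordiv (lo + hi) 2 :=
        (PySem.Int.le_floordiv_iff_mul_le (by omega)).mpr (by omega)
      have hmidhi : PySem.Int.floordiv (lo + hi) 2 < hi :=
        (PySem.Int.floordiv_lt_iff_lt_mul (by omega)).mpr (by omega)
      set mid := PySem.Int.floordiv (lo + hi) 2 with hmid
      have hmlen2 : mid < (st.length : Int) := by omega
      have hmlen : mid.toNat < st.length := by omega
      have hget : PySem.List.pyGetD st mid (0, 0) = st[mid.toNat] :=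
        PySem.List.pyGetD_eq_getElem st (0, 0) (by omega) hmlen2
      by_cases hb : x < (st[mid.toNat]).2
      · rw [if_pos (by rw [hget]; exact hb)]
        have : mid.toNat < pvM st x := (pvM_iff st x hs mid.toNat hmlen).mp hb
        exact ih (mid + 1) hi (by omega) (by omega) (by omega) hhi hlen
      · rw [if_neg (by rw [hget]; exact hb)]
        have : ¬ mid.toNat < pvM st x := fun hc => hb ((pvM_iff st x hs mid.toNat hmlen).mpr hc)
        exact ih lo mid (by omega) h0 hlo (by omega) (by omega)
    · rw [dif_neg hlt]
      omega

lemma query_spec (n maxd : Int) (case : List Int) (ci lb : Int) (st : List (Int × Int))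
    (hlb : lb ≤ n) (hInv : pvInv n case lb st) :
    pvBrkP n maxd case ci lb
      ((if bsearch st (ci + maxd) 0 (st.length : Int) ≠ 0 then
          (PySem.List.pyGetD st (bsearch st (ci + maxd) 0 (st.length : Int) - 1) (0, 0)).1
        else n) - lb) := by
  obtain ⟨he, hs, hd⟩ := hInv
  have hmle : pvM st (ci + maxd) ≤ st.length := by
    unfold pvM; exact (List.takeWhile_prefix _).length_le
  have hbs : bsearch st (ci + maxd) 0 (st.length : Int) = (pvM st (ci + maxd) : Int) :=
    bsearch_eq st (ci + maxd) hs st.length 0 (st.length : Int) (by omega) (by omega)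
      (by omega) (by omega) (by omega)
  rw [hbs]
  set x := ci + maxd with hx
  by_cases hm : pvM st x = 0
  · rw [if_neg (by omega)]
    refine ⟨by omega, ?_, Or.inl (by omega)⟩
    intro t h1 h2
    refine ⟨by omega, ?_⟩
    by_contra hc
    push_neg at hc
    obtain ⟨p, hp, hple, hdom⟩ := hd t h1 (by omega)
    obtain ⟨k, hkl, hkeq⟩ := List.getElem_of_mem hp
    have hxk : x < st[k].2 := by rw [hkeq]; omega
    have := (pvM_iff st x hs k hkl).mp hxk
    omega
  · rw [if_pos (by omega : ((pvM st x : Int)) ≠ 0)]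
    have hidx : ((pvM st x : Int) - 1).toNat = pvM st x - 1 := by omega
    have hk0 : pvM st x - 1 < st.length := by omega
    have hget : PySem.List.pyGetD st ((pvM st x : Int) - 1) (0, 0) =
        st[((pvM st x : Int) - 1).toNat] :=
      PySem.List.pyGetD_eq_getElem st (0, 0) (by omega) (by omega)
    rw [hget]
    simp only [hidx]
    set pstar := st[pvM st x - 1]'hk0 with hpstar
    have hpmem : pstar ∈ st := by rw [hpstar]; exact List.getElem_mem hk0
    obtain ⟨hp1, hp2, hp3⟩ := he pstar hpmem
    have hxp : x < pstar.2 := (pvM_iff st x hs (pvM st x - 1) hk0).mpr (by omega)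
    refine ⟨by omega, ?_, Or.inr ?_⟩
    · intro t h1 h2
      have htn : t < n := by omega
      refine ⟨htn, ?_⟩
      by_contra hc
      push_neg at hc
      obtain ⟨p, hp, hple, hdom⟩ := hd t h1 htn
      obtain ⟨k, hkl, hkeq⟩ := List.getElem_of_mem hp
      have hxk : x < st[k].2 := by rw [hkeq]; omega
      have hklt := (pvM_iff st x hs k hkl).mp hxk
      rcases eq_or_lt_of_le (by omega : k ≤ pvM st x - 1) with heq | hlt
      · subst heq
        rw [← hpstar] at hkeq
        rw [← hkeq] at hple
        omega
      · have hpair := ((List.pairwise_iff_getElem.mp hs) k (pvM st x - 1) hkl hk0 hlt).1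
        rw [← hpstar, hkeq] at hpair
        omega
    · have hgb : pvG case (lb + (pstar.1 - lb)) = pstar.2 := by
        rw [show lb + (pstar.1 - lb) = pstar.1 by omega, ← hp3]
      omega

def termA (n maxd : Int) (case : List Int) (i : Int) : Int :=
  let c := cntA maxd case n (pvG case i) (i + 1)
  if 2 ≤ c then PySem.Int.floordiv (PySem.Int.mod (c * (c - 1)) 99997867) 2 else 0

lemma stepB_spec (n maxd : Int) (case : List Int) (i : Int) (st : List (Int × Int)) (tot : Int)
    (hInv : pvInv n case (i + 2) st) (hin : i + 2 ≤ n) :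
    stepB n maxd case (st, tot) i =
      (popLe (pvG case (i + 1)) st ++ [(i + 1, pvG case (i + 1))],
       tot + termA n maxd case i) ∧
    pvInv n case (i + 1) (popLe (pvG case (i + 1)) st ++ [(i + 1, pvG case (i + 1))]) := by
  have hInv' := insert_inv n case i st hInv (by omega)
  have hq := query_spec n maxd case (pvG case i) (i + 1)
    (popLe (pvG case (i + 1)) st ++ [(i + 1, pvG case (i + 1))]) (by omega) hInv'
  have hA := cntA_spec maxd case n (pvG case i) (n - (i + 1)).toNat (i + 1) le_rfl
  refine ⟨?_, hInv'⟩
  have hceq := pvBrkP_unique n maxd case (pvG case i) (i + 1) _ _ hq hA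
  simp only [stepB]
  simp only [pvG] at hceq ⊢
  rw [hceq]
  simp only [termA, pvG]
  split
  · rfl
  · simp

lemma foldB (n maxd : Int) (case : List Int) :
    ∀ (m : Nat) (st : List (Int × Int)) (tot : Int), (m : Int) ≤ n - 2 →
      pvInv n case ((m : Int) + 1) st →
      ((((List.range m).map (fun (k : Nat) => (k : Int))).reverse.foldl (stepB n maxd case) (st, tot)).2
        = tot + (((List.range m).map (fun (k : Nat) => termA n maxd case (k : Int))).sum)) := by
  intro m
  induction m with
  | zero => intro st tot _ _; simp
  | succ m ih =>
    intro st tot hm hInv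
    rw [List.range_succ]
    simp only [List.map_append, List.reverse_append, List.map_cons, List.map_nil,
      List.reverse_cons, List.reverse_nil, List.nil_append, List.cons_append,
      List.foldl_cons]
    have hInv2 : pvInv n case ((m : Int) + 2) st := by
      have h12 : ((m : Nat) + 1 : Int) + 1 = (m : Int) + 2 := by push_cast; omega
      have := hInv
      rw [show (((m + 1 : Nat) : Int) + 1) = (m : Int) + 2 by push_cast; omega] at this
      exact this
    obtain ⟨hstep, hInv'⟩ := stepB_spec n maxd case (m : Int) st tot hInv2
      (by push_cast at hm ⊢; omega)
    rw [hstep]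
    rw [ih _ _ (by push_cast at hm ⊢; omega) hInv']
    rw [List.sum_append]
    simp only [List.sum_cons, List.sum_nil]
    omega

lemma A_eq_sum (n maxd : Int) (case : List Int) :
    numOfcase n maxd case =
      (((List.range (n - 2).toNat).map (fun (k : Nat) => termA n maxd case (k : Int))).sum) := by
  unfold numOfcase
  rw [PySem.List.pyRange_one]
  simp only [sub_zero, zero_add]
  rw [List.foldl_map]
  have hb : (fun (x : Int) (y : Nat) =>
      if 2 ≤ cntA maxd case n (PySem.List.pyGetD case (↑y) 0) (↑y + 1) then
        x + PySem.Int.floordiv (PySem.Int.mod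
          (cntA maxd case n (PySem.List.pyGetD case (↑y) 0) (↑y + 1) *
            (cntA maxd case n (PySem.List.pyGetD case (↑y) 0) (↑y + 1) - 1)) 99997867) 2
      else x)
      = fun (x : Int) (y : Nat) => x + termA n maxd case (y : Int) := by
    funext x y
    simp only [termA, pvG]
    split
    · rfl
    · simp
  rw [hb, PySem.List.foldl_add]
  simp

-- ===== VERDICT (by name: the statement is the Claim_ definition above) =====
theorem numOfcase_spec : Claim_equal_numOfcase := by
  intro n maxd case _ _
  unfold Spec_numOfcase numOfcase_alt
  by_cases h3 : n < 3
  · rw [if_pos h3, A_eq_sum]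
    have h0 : (n - 2).toNat = 0 := by omega
    rw [h0]
    simp
  · rw [if_neg h3]
    rw [PySem.List.pyRange_one]
    simp only [sub_zero, zero_add]
    have hInv0 : pvInv n case (((n - 2).toNat : Int) + 1)
        [(n - 1, PySem.List.pyGetD case (n - 1) 0)] := by
      refine ⟨?_, by simp, ?_⟩
      · intro p hp
        simp at hp
        subst hp
        exact ⟨by omega, by omega, rfl⟩
      · intro t h1 h2
        have ht : t = n - 1 := by omega
        subst ht
        exact ⟨(n - 1, PySem.List.pyGetD case (n - 1) 0), by simp, le_rfl, le_of_eq rfl⟩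
    have hfold := foldB n maxd case (n - 2).toNat
      [(n - 1, PySem.List.pyGetD case (n - 1) 0)] 0 (by omega) hInv0
    rw [hfold, A_eq_sum]
    simp
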